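-- pv_equiv track=rewrite | github.com/srajsonu/CodeChef | March Long Challenge 2021/2. Chef and Groups.py | solve
-- ===== SOURCE A (Python) =====
-- def solve(A):
--     n = len(A)
--     cnt = 0
--     if A[0] == '1':
--         cnt += 1
--
--     for i in range(1, n):
--         prev = A[i-1]
--         curr = A[i]
--
--         if prev == '0' and curr == '1':
--             cnt += 1
--
--     return cnt
-- ===== SOURCE B (Python) =====
-- def solve(A):
--     # Partition the string into the chunks between '0's; a group of '1's begins
--     # exactly at a chunk that starts with '1' (the first chunk covers a leading '1',
--     # every later chunk begins right after a '0').
--     return sum(1 for g in A.split('0') if g.startswith('1'))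
-- ===== Notes on version B (the rewrite author's own statement) =====
-- stated objective: idiomatic
-- what changed: B partitions the string into chunks with A.split('0') and counts the chunks that start with '1' (build-groups-then-count decomposition, the scan done by the C-level split) instead of A's Python-level index loop counting 0->1 adjacent transitions plus a first-character check.
import Mathlib
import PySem

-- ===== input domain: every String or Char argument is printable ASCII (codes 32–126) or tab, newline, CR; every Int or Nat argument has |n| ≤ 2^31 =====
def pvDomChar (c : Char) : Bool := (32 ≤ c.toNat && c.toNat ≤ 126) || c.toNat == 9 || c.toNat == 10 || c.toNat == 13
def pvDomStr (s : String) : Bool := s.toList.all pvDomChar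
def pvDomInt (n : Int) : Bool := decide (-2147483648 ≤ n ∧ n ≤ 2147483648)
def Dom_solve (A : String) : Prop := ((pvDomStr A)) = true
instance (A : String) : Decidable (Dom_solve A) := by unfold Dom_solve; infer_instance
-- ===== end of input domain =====

-- B partitions the string into chunks with split('0') and counts the chunks starting with '1',
-- replacing A's adjacent-pair transition loop (idiomatic decomposition, same O(n) cost).

-- ===== PORT A =====
def solve (A : String) : Int :=
  let n : Int := PySem.Str.len A
  let cnt : Int := 0
  let cnt := if PySem.Str.pyGet? A 0 = some '1' then cnt + 1 else cnt
  (PySem.List.pyRange 1 n).foldl (fun cnt i =>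
    let prev := PySem.Str.pyGet? A (i - 1)
    let curr := PySem.Str.pyGet? A i
    if prev = some '0' ∧ curr = some '1' then cnt + 1 else cnt) cnt

-- ===== PORT B =====
-- A.split('0') with the literal nonempty separator '0' is Chars.splitOn (the sep ≠ "" form);
-- sum(1 for g in … if g.startswith('1')) is the count of chunks passing the startswith test.
def solve_alt (A : String) : Int :=
  ((PySem.Chars.splitOn A.toList ['0']).countP
    (fun g => PySem.Chars.startswith g ['1']) : Int)

-- ===== PRECONDITION & SPEC =====
-- A evaluates A[0], which raises IndexError on the empty string; Pre_ excludes exactly that input.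
def Pre_solve (A : String) : Prop := A ≠ ""
instance (A : String) : Decidable (Pre_solve A) := by unfold Pre_solve; infer_instance
def pvWitness_solve : String := "0110"

def Spec_solve (A : String) (out : Int) : Prop := out = solve_alt A
instance (A : String) (out : Int) : Decidable (Spec_solve A out) := by unfold Spec_solve; infer_instance

-- ===== CLAIM (what is proved, stated in full; the proofs are below) =====
def Claim_equal_solve : Prop := ∀ (A : String), Dom_solve A → Pre_solve A → Spec_solve A (solve A)

-- ===== LEMMAS AND PROOFS =====

-- number of adjacent pairs ('0','1') in a char list
def pairs01 : List Char → Nat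
  | a :: b :: t => (if a = '0' ∧ b = '1' then 1 else 0) + pairs01 (b :: t)
  | _ => 0

lemma pairs01_cons_of_ne (a : Char) (t : List Char) (h : a ≠ '0') :
    pairs01 (a :: t) = pairs01 t := by
  cases t with
  | nil => rfl
  | cons b t' => simp [pairs01, h]

lemma pairs01_cons_zero (t : List Char) :
    pairs01 ('0' :: t) = (if t.head? = some '1' then 1 else 0) + pairs01 t := by
  cases t with
  | nil => simp [pairs01]
  | cons b t' =>
    simp only [pairs01, List.head?_cons]
    by_cases hb : b = '1' <;> simp [hb]

-- whether the chunk being assembled (cur reversed, then the upcoming part of l) starts with '1'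
def curStarts1 (cur l : List Char) : Nat :=
  if cur = [] then (if l.head? = some '1' then 1 else 0)
  else (if cur.reverse.head? = some '1' then 1 else 0)

-- B side: invariant of the fuel-driven splitOn.go scan, counting chunks that start with '1'
lemma splitOn_go_count' (fuel : Nat) :
    ∀ (l cur : List Char) (acc : List (List Char)), l.length < fuel →
    (PySem.Chars.splitOn.go ['0'] fuel l cur acc).countP (fun g => g.head? = some '1')
      = acc.countP (fun g => g.head? = some '1') + pairs01 l + curStarts1 cur l := by
  induction fuel with
  | zero => intro l cur acc h; omega
  | succ fuel ih =>
    intro l cur acc h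
    cases l with
    | nil =>
      simp only [PySem.Chars.splitOn.go, List.countP_reverse, List.countP_cons, pairs01,
        curStarts1]

      cases cur with
      | nil => simp
      | cons c cur' => simp
    | cons a t =>
      simp only [PySem.Chars.splitOn.go]
      by_cases ha : a = '0'
      · have hp : List.isPrefixOf ['0'] (a :: t) = true := by
          subst ha; simp [List.isPrefixOf]
        rw [if_pos hp]
        have hlen : t.length < fuel := by simp at h; omega
        rw [show List.drop (List.length ['0']) (a :: t) = t from rfl, ih t [] _ hlen]
        subst ha
        rw [pairs01_cons_zero]
        simp only [List.countP_cons, curStarts1, List.head?_cons]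
        cases cur with
        | nil => simp; split_ifs <;> omega
        | cons c cur' =>
          rw [if_neg (by simp : ¬ (c :: cur' : List Char) = [])]
          split_ifs <;> (try simp_all) <;> omega
      · have hp : List.isPrefixOf ['0'] (a :: t) = false := by
          simp [List.isPrefixOf]; exact fun hc => absurd hc.symm ha
        rw [if_neg (by simp [hp])]
        have hlen : t.length < fuel := by simp at h; omega
        rw [ih t (a :: cur) acc hlen, pairs01_cons_of_ne a t ha]
        have hc : curStarts1 (a :: cur) t = curStarts1 cur (a :: t) := by
          cases cur with
          | nil => simp [curStarts1]
          | cons c cur' => simp [curStarts1]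
        omega

lemma splitOn_count (cs : List Char) :
    (PySem.Chars.splitOn cs ['0']).countP (fun g => g.head? = some '1')
      = pairs01 cs + (if cs.head? = some '1' then 1 else 0) := by
  rw [show PySem.Chars.splitOn cs ['0'] = PySem.Chars.splitOn.go ['0'] (cs.length + 1) cs [] [] from rfl,
      splitOn_go_count' (cs.length + 1) cs [] [] (by omega)]
  simp [curStarts1]

-- A side: counting indices k with cs[k]='0', cs[k+1]='1' over range (len-1) is pairs01
lemma countP_range_eq_pairs01 (cs : List Char) :
    (List.range (cs.length - 1)).countP
      (fun k => decide (cs[k]? = some '0' ∧ cs[k + 1]? = some '1')) = pairs01 cs := by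
  induction cs with
  | nil => rfl
  | cons a t ih =>
    cases t with
    | nil => rfl
    | cons b t' =>
      have hlen : (a :: b :: t').length - 1 = (b :: t').length - 1 + 1 := by
        simp
      rw [hlen, List.range_succ_eq_map, List.countP_cons, List.countP_map]
      have hshift : ((fun k => decide ((a :: b :: t')[k]? = some '0' ∧ (a :: b :: t')[k + 1]? = some '1')) ∘ (fun i => i + 1))
          = (fun k => decide ((b :: t')[k]? = some '0' ∧ (b :: t')[k + 1]? = some '1')) := by
        funext k
        simp [Function.comp, List.getElem?_cons_succ]
      rw [hshift, ih]
      simp only [pairs01]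
      by_cases hab : a = '0' ∧ b = '1'
      · simp [hab, Nat.add_comm]
      · have : ¬ ((a :: b :: t')[0]? = some '0' ∧ (a :: b :: t')[0 + 1]? = some '1') := by
          simpa using hab
        simp [hab]

lemma pyRange_one_natCast (m : Nat) :
    PySem.List.pyRange 1 ((m : Int) + 1) = (List.range m).map (fun k => ((k + 1 : Nat) : Int)) := by
  induction m with
  | zero => rfl
  | succ m ih =>
    rw [show ((m + 1 : Nat) : Int) + 1 = ((m : Int) + 1) + 1 by push_cast; ring,
        PySem.List.pyRange_one_succ_right (by omega), ih, List.range_succ]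
    simp

-- startswith g "1" is exactly "g begins with '1'"
lemma startswith_one_eq (g : List Char) :
    PySem.Chars.startswith g ['1'] = decide (g.head? = some '1') := by
  cases g with
  | nil => decide
  | cons c t =>
    simp only [PySem.Chars.startswith, List.isPrefixOf, List.head?_cons]
    by_cases hc : c = '1'
    · subst hc; simp
    · simp [hc, Ne.symm hc]

-- ===== VERDICT (by name: the statement is the Claim_ definition above) =====
theorem solve_spec : Claim_equal_solve := by
  intro A _ hpre
  unfold Spec_solve solve solve_alt
  obtain ⟨a, t, hcs⟩ : ∃ a t, A.toList = a :: t := by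
    cases h : A.toList with
    | nil => exact absurd (String.toList_eq_nil_iff.mp h) hpre
    | cons a t => exact ⟨a, t, rfl⟩
  have hlen : PySem.Str.len A = ((t.length : Int) + 1) := by
    simp [PySem.Str.len_eq, hcs]
  simp only []
  rw [hlen, pyRange_one_natCast, List.foldl_map,
      PySem.List.foldl_ite_add_one (fun k : Nat =>
        PySem.Str.pyGet? A (((k + 1 : Nat) : Int) - 1) = some '0' ∧
        PySem.Str.pyGet? A ((k + 1 : Nat) : Int) = some '1')]
  have hget : ∀ (i : Nat), PySem.Str.pyGet? A (i : Int) = A.toList[i]? := by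
    intro i; simp
  have hp : (fun k : Nat => decide (PySem.Str.pyGet? A (((k + 1 : Nat) : Int) - 1) = some '0' ∧
        PySem.Str.pyGet? A ((k + 1 : Nat) : Int) = some '1'))
      = (fun k : Nat => decide (A.toList[k]? = some '0' ∧ A.toList[k + 1]? = some '1')) := by
    funext k
    rw [show (((k + 1 : Nat) : Int) - 1) = ((k : Nat) : Int) by push_cast; ring, hget, hget]
  rw [hp]
  have hsw : (fun g : List Char => PySem.Chars.startswith g ['1'])
      = (fun g : List Char => decide (g.head? = some '1')) := by
    funext g; exact startswith_one_eq g
  rw [hsw]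
  have hB := splitOn_count A.toList
  have hrange : t.length = A.toList.length - 1 := by simp [hcs]
  have hhead : PySem.Str.pyGet? A 0 = A.toList.head? := by
    rw [show ((0 : Int)) = ((0 : Nat) : Int) from rfl, hget]
    cases A.toList <;> simp
  rw [hrange, countP_range_eq_pairs01, hhead]
  rw [show (fun g : List Char => decide (g.head? = some '1')) = (fun g : List Char => decide (g.head? = some '1')) from rfl] at hB
  rw [hB]
  split_ifs <;> omega
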